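-- pv_equiv track=rewrite | github.com/Hojott/tira | vko3/bigwin.py | count
-- ===== SOURCE A (Python) =====
-- def count(t):
--     d = dict()
--     cases = 0
--     for i, v in enumerate(t):
--         # increment dict
--         if not v in d:
--             d[v] = 0
--         d[v] += 1
--
--         # cases that can be dismissed
--         if v % 2 or not v // 2 in d:
--             continue
--
--         # aaaaaaAH
--         cases += d[v // 2]
--
--     return cases
-- ===== SOURCE B (Python) =====
-- def count(t):
--     rem = {}
--     for v in t:
--         rem[v] = rem.get(v, 0) + 1
--     cases = 0
--     for v in t:
--         cases += rem.get(2 * v, 0)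
--         rem[v] -= 1
--     return cases
-- ===== Notes on version B (the rewrite author's own statement) =====
-- stated objective: alternative
-- what changed: A grows a prefix counter and, at each even element, looks up its half among earlier elements; B builds the full counter once and then scans treating each element as the half, reading the remaining count of its double before decrementing its own entry.
import Mathlib
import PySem

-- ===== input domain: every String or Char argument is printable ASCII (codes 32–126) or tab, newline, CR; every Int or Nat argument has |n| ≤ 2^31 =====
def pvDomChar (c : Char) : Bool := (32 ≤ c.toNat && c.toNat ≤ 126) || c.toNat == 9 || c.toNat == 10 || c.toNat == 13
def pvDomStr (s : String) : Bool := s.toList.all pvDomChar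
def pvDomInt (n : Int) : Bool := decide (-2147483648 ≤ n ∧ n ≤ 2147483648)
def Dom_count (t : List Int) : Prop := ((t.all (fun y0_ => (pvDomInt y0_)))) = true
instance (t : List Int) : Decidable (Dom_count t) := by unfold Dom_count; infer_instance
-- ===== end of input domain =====

-- B builds the whole counter up front and scans each element as the HALF of a pair
-- (reading the remaining count of its double before decrementing), where A grows a
-- prefix counter and looks up the half at each even element; alternative decomposition, same cost.

-- ===== PORT A =====
-- A's loop body: update the prefix dict, then (for even v with v//2 present) add d[v//2]
def pvStepA (st : PySem.Dict Int Int × Int) (v : Int) : PySem.Dict Int Int × Int :=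
  let d := (if ¬ st.1.contains v then st.1.insert v 0 else st.1).modify v 0 (· + 1)
  if PySem.Int.mod v 2 ≠ 0 ∨ ¬ d.contains (PySem.Int.floordiv v 2) then (d, st.2)
  else (d, st.2 + d.getD (PySem.Int.floordiv v 2) 0)

def count (t : List Int) : Int :=
  ((PySem.List.enumerate t 0).foldl (fun st iv => pvStepA st iv.2) (PySem.Dict.empty, 0)).2

-- ===== PORT B =====
-- B's second loop body: read rem[2*v] (0 if absent), then decrement rem[v]
def pvStepB (st : PySem.Dict Int Int × Int) (v : Int) : PySem.Dict Int Int × Int :=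
  (st.1.modify v 0 (· - 1), st.2 + st.1.getD (2 * v) 0)

def count_alt (t : List Int) : Int :=
  let rem := t.foldl (fun (d : PySem.Dict Int Int) v => d.insert v (d.getD v 0 + 1)) PySem.Dict.empty
  (t.foldl pvStepB (rem, 0)).2

-- ===== PRECONDITION & SPEC =====
def Spec_count (t : List Int) (out : Int) : Prop := out = count_alt t
instance (t : List Int) (out : Int) : Decidable (Spec_count t out) := by unfold Spec_count; infer_instance

-- ===== CLAIM (what is proved, stated in full; the proofs are below) =====
def Claim_equal_count : Prop := ∀ (t : List Int), Dom_count t → Spec_count t (count t)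

-- ===== LEMMAS AND PROOFS =====

-- the common value: for each suffix head v, the number of occurrences of 2*v in the suffix
def pvN : List Int → Int
  | [] => 0
  | v :: s => ((v :: s).count (2 * v) : Int) + pvN s

-- A's dict update on absent keys equals the plain Counter update (items level)
lemma pv_step_dict_absent (d : PySem.Dict Int Int) (v : Int)
    (h : (d.items.any fun p => p.1 == v) = false) :
    (d.insert v 0).modify v 0 (· + 1) = d.modify v 0 (· + 1) := by
  have h' := List.any_eq_false.mp h
  have hf : List.find? (fun p : Int × Int => p.1 == v) d.items = none :=
    List.find?_eq_none.mpr (fun p hp => h' p hp)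
  apply PySem.Dict.ext
  simp [PySem.Dict.modify, PySem.Dict.insert, PySem.Dict.contains, PySem.Dict.getD,
    PySem.Dict.get?, hf, h]
  nth_rewrite 2 [show d.items = List.map id d.items from (List.map_id d.items).symm]
  refine List.map_congr_left fun p hp => ?_
  have hne : ¬ p.1 = v := by simpa using h' p hp
  simp [hne]

-- A's dict update equals the plain Counter update
lemma pv_step_dict (d : PySem.Dict Int Int) (v : Int) :
    (if ¬ d.contains v then d.insert v 0 else d).modify v 0 (· + 1) = d.modify v 0 (· + 1) := by
  by_cases h : d.contains v
  · simp [h]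
  · rw [if_pos (by simp [h])]
    exact pv_step_dict_absent d v (eq_false_of_ne_true h)

-- decomposition of pvN at the right end: the appended element acts as the DOUBLE
lemma pvN_append (p : List Int) (v : Int) :
    pvN (p ++ [v]) = pvN p + ((p ++ [v]).countP (fun x => decide (2 * x = v)) : Int) := by
  induction p with
  | nil =>
    by_cases h : 2 * v = v <;>
      simp [pvN, h, eq_comm (a := v)]
  | cons x p ih =>
    simp only [List.cons_append, pvN, ih, List.countP_cons, List.count_cons, List.count_append]
    by_cases h : 2 * x = v <;> by_cases h2 : 2 * v = v <;>
      simp [h, h2, eq_comm (a := v)] <;> ring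

-- A's contribution at an appended element v, computed from the full counter of p ++ [v]
lemma pv_contrib (p : List Int) (v : Int) :
    (if PySem.Int.mod v 2 ≠ 0 ∨ ¬ (PySem.Dict.counter (p ++ [v])).contains (PySem.Int.floordiv v 2)
     then 0
     else (PySem.Dict.counter (p ++ [v])).getD (PySem.Int.floordiv v 2) 0)
      = ((p ++ [v]).countP (fun x => decide (2 * x = v)) : Int) := by
  by_cases hodd : PySem.Int.mod v 2 ≠ 0
  · have hdvd : ¬ (2 ∣ v) := fun h => hodd ((PySem.Int.mod_eq_zero_iff_dvd v 2).mpr h)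
    rw [if_pos (Or.inl hodd), List.countP_eq_zero.mpr]
    · simp
    · intro x _; simp only [decide_eq_true_eq]; exact fun h => hdvd ⟨x, by omega⟩
  · push Not at hodd
    have hdvd : 2 ∣ v := (PySem.Int.mod_eq_zero_iff_dvd v 2).mp hodd
    have hv : 2 * PySem.Int.floordiv v 2 = v := by
      rw [PySem.Int.floordiv_eq_ediv_of_pos (a := v) (by omega)]
      exact Int.mul_ediv_cancel' hdvd
    by_cases hc : (PySem.Dict.counter (p ++ [v])).contains (PySem.Int.floordiv v 2)
    · have hnc : ¬ (PySem.Int.mod v 2 ≠ 0 ∨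
          ¬ (PySem.Dict.counter (p ++ [v])).contains (PySem.Int.floordiv v 2) = true) := by
        push Not
        exact ⟨hodd, hc⟩
      rw [if_neg hnc, PySem.Dict.getD_counter, List.count_eq_countP]
      congr 1
      refine List.countP_congr fun x _ => ?_
      constructor <;> intro h <;> simp only [beq_iff_eq, decide_eq_true_eq] at * <;> omega
    · rw [if_pos (Or.inr (by simpa using hc)), List.countP_eq_zero.mpr, Nat.cast_zero]
      intro x hx hxv
      apply hc
      rw [PySem.Dict.contains_counter]
      have hxe : x = PySem.Int.floordiv v 2 := by
        simp only [decide_eq_true_eq] at hxv; omega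
      subst hxe
      simpa using hx

-- A's fold maintains exactly the Counter of the prefix and the pair count of the prefix
lemma pvA_fold (p : List Int) :
    p.foldl pvStepA (PySem.Dict.empty, 0) = (PySem.Dict.counter p, pvN p) := by
  induction p using List.reverseRecOn with
  | nil => rfl
  | append_singleton p v ih =>
    rw [List.foldl_append, ih, List.foldl_cons, List.foldl_nil]
    simp only [pvStepA, pv_step_dict, ← PySem.Dict.counter_append_singleton]
    rw [pvN_append, ← pv_contrib p v]
    split_ifs <;> simp

-- B's second loop: if the dict holds the multiset of the remaining suffix, it adds pvN of it
lemma pvB_loop (s : List Int) (d : PySem.Dict Int Int) (c : Int)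
    (hinv : ∀ x, d.getD x 0 = (s.count x : Int)) :
    (s.foldl pvStepB (d, c)).2 = c + pvN s := by
  induction s generalizing d c with
  | nil => simp [pvN]
  | cons w s ih =>
    rw [List.foldl_cons]
    have hstep : pvStepB (d, c) w = (d.modify w 0 (· - 1), c + d.getD (2 * w) 0) := rfl
    rw [hstep, ih _ _ (fun x => ?_), hinv (2 * w)]
    · simp [pvN]; ring
    · by_cases hx : x = w
      · subst hx
        rw [PySem.Dict.getD_modify_self, hinv x, List.count_cons_self]
        push_cast; ring
      · have hcount : List.count x (w :: s) = List.count x s := by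
          have hwx : ¬ w = x := fun h => hx h.symm
          simp [hwx]
        rw [PySem.Dict.getD_modify_of_ne d 0 _ hx, hinv x, hcount]

-- ===== VERDICT (by name: the statement is the Claim_ definition above) =====
theorem count_spec : Claim_equal_count := by
  intro t _
  show count t = count_alt t
  unfold count count_alt
  rw [PySem.Dict.foldl_insert_getD_add_one_eq_counter]
  rw [show (PySem.List.enumerate t 0).foldl (fun st iv => pvStepA st iv.2)
        (PySem.Dict.empty, 0) = t.foldl pvStepA (PySem.Dict.empty, 0) by
      rw [← List.foldl_map, PySem.List.map_snd_enumerate]]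
  rw [pvA_fold, pvB_loop t _ 0 (fun x => PySem.Dict.getD_counter t x)]
  simp
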